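-- pv_equiv track=rewrite | github.com/watsoncole/racko_ai | card game ai (RACKO).py | logic_racko
-- ===== SOURCE A (Python) =====
-- def logic_racko(pile, original_hand):
--     hand = original_hand[:]
--
--     card = pile[len(pile) - 1]
--     # checks for racko if card is taken
--     for j in range(len(hand)):
--         temp = hand[j]
--         hand[j] = card
--         nottrue = 0
--         for i in range(len(hand) - 1):
--             if hand[i] > hand[i + 1]:
--                 nottrue = 1
--         hand[j] = temp
--         if nottrue == 0:
--             return True
-- ===== SOURCE B (Python) =====
-- def logic_racko(pile, original_hand):
--     card = pile[-1]
--     h = original_hand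
--     n = len(h)
--     # suff[i] is True iff h[i:] is non-decreasing; built right-to-left
--     suff = []
--     ok = True
--     nxt = None
--     for x in reversed(h):
--         if nxt is not None and x > nxt:
--             ok = False
--         suff.append(ok)
--         nxt = x
--     suff.reverse()
--     # single forward pass: prefok tracks whether h[:j] is non-decreasing,
--     # prev is h[j-1]; replacing h[j] by card sorts the hand iff the prefix
--     # and suffix are sorted and card fits between its neighbours.
--     prefok = True
--     prev = None
--     for j in range(n):
--         x = h[j]
--         left = prefok and (prev is None or prev <= card)
--         right = j + 1 >= n or (suff[j + 1] and card <= h[j + 1])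
--         if left and right:
--             return True
--         if prev is not None and prev > x:
--             prefok = False
--         prev = x
-- ===== Notes on version B (the rewrite author's own statement) =====
-- stated objective: faster
-- what changed: A tries every position and rescans the whole hand for sortedness each time (O(n^2)); B precomputes suffix-sortedness flags in one backward pass and then checks each position in O(1) (prefix-sorted flag, neighbour comparisons against the drawn card) in one forward pass, O(n) total.
import Mathlib
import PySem

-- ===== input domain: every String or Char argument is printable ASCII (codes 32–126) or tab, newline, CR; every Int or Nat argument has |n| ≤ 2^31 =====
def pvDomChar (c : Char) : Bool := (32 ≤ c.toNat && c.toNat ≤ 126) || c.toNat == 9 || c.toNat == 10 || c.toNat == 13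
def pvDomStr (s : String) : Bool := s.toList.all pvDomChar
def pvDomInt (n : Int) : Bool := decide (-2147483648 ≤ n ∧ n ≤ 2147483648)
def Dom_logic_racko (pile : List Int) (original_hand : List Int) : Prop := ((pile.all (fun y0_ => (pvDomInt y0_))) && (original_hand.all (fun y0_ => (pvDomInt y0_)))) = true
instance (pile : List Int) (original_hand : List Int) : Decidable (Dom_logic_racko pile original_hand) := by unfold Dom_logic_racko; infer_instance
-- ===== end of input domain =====

-- B replaces A's O(n^2) try-every-position rescans by one right-to-left pass precomputing
-- suffix-sortedness flags and one forward pass doing an O(1) neighbour check per position: O(n).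

-- ===== PORT A =====
-- inner 'for i' loop of A: nottrue after scanning all adjacent pairs
def logicRackoCheck (hand : List Int) : Int :=
  (PySem.List.pyRange 0 ((hand.length : Int) - 1) 1).foldl
    (fun nottrue i =>
      if PySem.List.pyGetD hand i 0 > PySem.List.pyGetD hand (i + 1) 0 then 1 else nottrue) 0

-- outer 'for j' loop of A (setting hand[j] := card then restoring temp = using the original hand)
def logicRackoLoop (card : Int) (hand : List Int) : List Int → Option Bool
  | [] => none
  | j :: rest =>
      let hand' := hand.set j.toNat card
      if logicRackoCheck hand' = 0 then some true
      else logicRackoLoop card hand rest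

def logic_racko (pile : List Int) (original_hand : List Int) : Option Bool :=
  match PySem.List.pyGet? pile ((pile.length : Int) - 1) with
  | none => none   -- IndexError on empty pile; excluded by Pre_
  | some card => logicRackoLoop card original_hand (PySem.List.pyRange 0 (original_hand.length : Int) 1)

-- ===== PORT B =====
-- one step of Source B's reversed(h) loop; state = (flags, ok, nxt)
def suffStep (st : List Bool × Bool × Option Int) (x : Int) : List Bool × Bool × Option Int :=
  let ok := match st.2.2 with
    | some nxt => if x > nxt then false else st.2.1
    | none => st.2.1
  (ok :: st.1, ok, some x)

-- Source B appends then reverses once at the end; consing while folding over reversed h builds the same list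
def suffFlags (h : List Int) : List Bool :=
  (h.reverse.foldl suffStep ([], true, none)).1

-- Source B's forward loop; the list arguments are h[j:] and suff[j:], so h[j+1]/suff[j+1] are the tails' heads
def fwdLoop (card : Int) : List Int → List Bool → Bool → Option Int → Option Bool
  | [], _, _, _ => none
  | x :: rest, sfl, prefok, prev =>
      let left := prefok && (match prev with | none => true | some p => decide (p ≤ card))
      let right := match rest, sfl.tail with
        | [], _ => true
        | y :: _, s :: _ => s && decide (card ≤ y)
        | _ :: _, [] => false
      if left && right then some true
      else fwdLoop card rest sfl.tail
        (match prev with | some p => if p > x then false else prefok | none => prefok) (some x)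

def logic_racko_alt (pile : List Int) (original_hand : List Int) : Option Bool :=
  match PySem.List.pyGet? pile (-1) with
  | none => none   -- IndexError on empty pile; excluded by Pre_
  | some card => fwdLoop card original_hand (suffFlags original_hand) true none

-- ===== PRECONDITION & SPEC =====
-- A raises IndexError on an empty pile (pile[len(pile)-1]); that is the only exception
def Pre_logic_racko (pile : List Int) (original_hand : List Int) : Prop := pile ≠ []
instance (pile : List Int) (original_hand : List Int) : Decidable (Pre_logic_racko pile original_hand) := by
  unfold Pre_logic_racko; infer_instance
def pvWitness_logic_racko : List Int × List Int := ([7], [1, 9, 3])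

def Spec_logic_racko (pile : List Int) (original_hand : List Int) (out : Option Bool) : Prop := out = logic_racko_alt pile original_hand
instance (pile : List Int) (original_hand : List Int) (out : Option Bool) : Decidable (Spec_logic_racko pile original_hand out) := by unfold Spec_logic_racko; infer_instance

-- ===== CLAIM (what is proved, stated in full; the proofs are below) =====
def Claim_equal_logic_racko : Prop := ∀ (pile : List Int) (original_hand : List Int), Dom_logic_racko pile original_hand → Pre_logic_racko pile original_hand → Spec_logic_racko pile original_hand (logic_racko pile original_hand)

-- ===== LEMMAS AND PROOFS =====

-- flags[i] = "h[i:] is non-decreasing", the structural characterization of suffFlags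
def chainFlags : List Int → List Bool
  | [] => []
  | x :: rest => decide (List.IsChain (· ≤ ·) (x :: rest)) :: chainFlags rest

theorem suffFold_spec (h : List Int) :
    h.foldr (fun x st => suffStep st x) (([], true, none) : List Bool × Bool × Option Int)
      = (chainFlags h, decide (List.IsChain (· ≤ ·) h), h.head?) := by
  induction h with
  | nil => simp [chainFlags]
  | cons x rest ih =>
      cases rest with
      | nil => simp [chainFlags, suffStep]
      | cons y t =>
          simp only [List.foldr_cons] at ih ⊢
          rw [ih]
          simp only [suffStep, chainFlags, List.head?_cons, List.isChain_cons_cons]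
          by_cases hxy : x > y
          · simp [hxy, show ¬ x ≤ y by omega]
          · simp [hxy, show x ≤ y by omega]

theorem suffFlags_eq_chainFlags (h : List Int) : suffFlags h = chainFlags h := by
  unfold suffFlags
  rw [List.foldl_reverse, suffFold_spec]

-- "replacing the j-th card of l (prefix context prev/prefok) by card sorts everything"
def goodAt (card : Int) (prev : Option Int) (prefok : Bool) (l : List Int) (j : Nat) : Prop :=
  prefok = true ∧ List.IsChain (· ≤ ·) (prev.toList ++ l.set j card)

theorem fwd_some (card : Int) (l : List Int) : ∀ (prefok : Bool) (prev : Option Int),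
    (fwdLoop card l (chainFlags l) prefok prev = some true ↔ ∃ j < l.length, goodAt card prev prefok l j) := by
  induction l with
  | nil => intro prefok prev; simp [fwdLoop]
  | cons x rest ih =>
      intro prefok prev
      rw [show chainFlags (x :: rest) = decide (List.IsChain (· ≤ ·) (x :: rest)) :: chainFlags rest from rfl]
      simp only [fwdLoop, List.tail_cons]
      split_ifs with hc
      · constructor
        · intro _
          refine ⟨0, by simp, ?_⟩
          unfold goodAt
          cases rest with
          | nil =>
              cases prev with
              | none => simp_all
              | some p => simp_all
          | cons y t =>
              rw [show chainFlags (y :: t) = decide (List.IsChain (· ≤ ·) (y :: t)) :: chainFlags t from rfl] at hc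
              cases prev with
              | none => simp_all
              | some p => simp_all
        · intro _; rfl
      · rw [ih]
        constructor
        · rintro ⟨j, hj, hg⟩
          refine ⟨j + 1, by simpa using hj, ?_⟩
          unfold goodAt at hg ⊢
          cases prev with
          | none => simpa using hg
          | some p =>
              rcases hg with ⟨hpo, hch⟩
              by_cases hpx : p > x
              · simp [hpx] at hpo
              · simp only [if_neg hpx] at hpo
                refine ⟨hpo, ?_⟩
                simp only [Option.toList_some, List.singleton_append] at hch
                show List.IsChain (· ≤ ·) (p :: x :: rest.set j card)
                rw [List.isChain_cons_cons]
                exact ⟨by omega, hch⟩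
        · rintro ⟨j, hj, hg⟩
          cases j with
          | zero =>
              exfalso
              apply hc
              unfold goodAt at hg
              rcases hg with ⟨hpo, hch⟩
              cases rest with
              | nil =>
                  cases prev with
                  | none => simp_all
                  | some p => simp_all
              | cons y t =>
                  rw [show chainFlags (y :: t) = decide (List.IsChain (· ≤ ·) (y :: t)) :: chainFlags t from rfl]
                  cases prev with
                  | none => simp_all
                  | some p => simp_all
          | succ j =>
              refine ⟨j, by simpa using hj, ?_⟩
              unfold goodAt at hg ⊢
              cases prev with
              | none => simpa using hg
              | some p =>
                  rcases hg with ⟨hpo, hch⟩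
                  have hch' : List.IsChain (· ≤ ·) (p :: x :: rest.set j card) := hch
                  rw [List.isChain_cons_cons] at hch'
                  rcases hch' with ⟨hpx, hch'⟩
                  refine ⟨by simp [hpo]; omega, ?_⟩
                  simpa using hch'

theorem fwd_cases (card : Int) (l : List Int) : ∀ (sfl : List Bool) (prefok : Bool) (prev : Option Int),
    fwdLoop card l sfl prefok prev = some true ∨ fwdLoop card l sfl prefok prev = none := by
  induction l with
  | nil => intro sfl prefok prev; right; rfl
  | cons x rest ih =>
      intro sfl prefok prev
      simp only [fwdLoop]
      split_ifs
      · left; rfl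
      · exact ih _ _ _

-- the inner-scan flag: foldl result is 1 iff some index violates, else the initial value
theorem foldl_flag (viol : Int → Prop) [DecidablePred viol] (l : List Int) : ∀ (nt : Int),
    l.foldl (fun nt i => if viol i then 1 else nt) nt = if ∃ i ∈ l, viol i then 1 else nt := by
  induction l with
  | nil => intro nt; simp
  | cons a l ih =>
      intro nt
      rw [List.foldl_cons, ih]
      by_cases ha : viol a <;> by_cases he : ∃ i ∈ l, viol i <;>
        simp [List.mem_cons, ha, he]

theorem check_eq_zero_iff (h : List Int) :
    logicRackoCheck h = 0 ↔ List.IsChain (· ≤ ·) h := by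
  unfold logicRackoCheck
  rw [foldl_flag (fun i => PySem.List.pyGetD h i 0 > PySem.List.pyGetD h (i + 1) 0)]
  rw [List.isChain_iff_getElem]
  by_cases he : ∃ i ∈ PySem.List.pyRange 0 ((h.length : Int) - 1) 1,
      PySem.List.pyGetD h i 0 > PySem.List.pyGetD h (i + 1) 0
  · rw [if_pos he]
    rcases he with ⟨i, hmem, hv⟩
    rw [PySem.List.mem_pyRange_one] at hmem
    constructor
    · intro h1; omega
    · intro hall
      exfalso
      have h1 := hall i.toNat (by omega)
      have h0i : (0 : Int) ≤ i := by omega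
      have h0i' : (0 : Int) ≤ i + 1 := by omega
      rw [PySem.List.pyGetD_of_nonneg h 0 h0i, PySem.List.pyGetD_of_nonneg h 0 h0i'] at hv
      have hb1 : i.toNat < h.length := by omega
      have hb2 : (i + 1).toNat < h.length := by omega
      rw [List.getD_eq_getElem h 0 hb1, List.getD_eq_getElem h 0 hb2] at hv
      have heq : (i + 1).toNat = i.toNat + 1 := by omega
      simp only [heq] at hv
      omega
  · rw [if_neg he]
    constructor
    · intro _ i hi
      by_contra hgt
      apply he
      refine ⟨(i : Int), ?_, ?_⟩
      · rw [PySem.List.mem_pyRange_one]; omega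
      · have hcast : ((i : Int) + 1) = ((i + 1 : Nat) : Int) := by omega
        rw [hcast, PySem.List.pyGetD_natCast h i 0, PySem.List.pyGetD_natCast h (i+1) 0]
        rw [List.getD_eq_getElem h 0 (show i < h.length by omega),
            List.getD_eq_getElem h 0 (show i + 1 < h.length by omega)]
        omega
    · intro _; rfl

theorem loop_some (card : Int) (hand : List Int) (js : List Int) :
    (logicRackoLoop card hand js = some true ↔ ∃ j ∈ js, logicRackoCheck (hand.set j.toNat card) = 0) := by
  induction js with
  | nil => simp [logicRackoLoop]
  | cons j rest ih =>
      simp only [logicRackoLoop, List.mem_cons]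
      by_cases hj : logicRackoCheck (hand.set j.toNat card) = 0
      · simp [hj]
      · rw [if_neg hj, ih]
        constructor
        · rintro ⟨i, hi, h0⟩; exact ⟨i, Or.inr hi, h0⟩
        · rintro ⟨i, hi, h0⟩
          rcases hi with rfl | hi
          · exact absurd h0 hj
          · exact ⟨i, hi, h0⟩

theorem loop_cases (card : Int) (hand : List Int) (js : List Int) :
    logicRackoLoop card hand js = some true ∨ logicRackoLoop card hand js = none := by
  induction js with
  | nil => right; rfl
  | cons j rest ih =>
      simp only [logicRackoLoop]
      split
      · left; rfl
      · exact ih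

theorem exists_iff (card : Int) (hand : List Int) :
    (∃ j ∈ PySem.List.pyRange 0 (hand.length : Int) 1, logicRackoCheck (hand.set j.toNat card) = 0)
      ↔ ∃ j < hand.length, goodAt card none true hand j := by
  constructor
  · rintro ⟨j, hmem, h0⟩
    rw [PySem.List.mem_pyRange_one] at hmem
    refine ⟨j.toNat, by omega, rfl, ?_⟩
    simpa using (check_eq_zero_iff _).1 h0
  · rintro ⟨j, hj, _, hch⟩
    refine ⟨(j : Int), ?_, ?_⟩
    · rw [PySem.List.mem_pyRange_one]; omega
    · rw [check_eq_zero_iff]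
      simpa using hch

theorem card_eq (pile : List Int) (hne : pile ≠ []) :
    PySem.List.pyGet? pile ((pile.length : Int) - 1) = PySem.List.pyGet? pile (-1) := by
  rw [PySem.List.pyGet?_neg_one]
  have hlen : 0 < pile.length := List.length_pos_iff.mpr hne
  have : ((pile.length : Int) - 1) = ((pile.length - 1 : Nat) : Int) := by omega
  rw [this, PySem.List.pyGet?_natCast]
  rw [List.getLast?_eq_getElem?]

-- ===== VERDICT (by name: the statement is the Claim_ definition above) =====
theorem logic_racko_spec : Claim_equal_logic_racko := by
  intro pile hand _ hpre
  unfold Spec_logic_racko logic_racko logic_racko_alt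
  rw [card_eq pile hpre]
  cases hcard : PySem.List.pyGet? pile (-1) with
  | none => dsimp only
  | some card =>
      dsimp only
      rw [suffFlags_eq_chainFlags]
      have hA := loop_some card hand (PySem.List.pyRange 0 (hand.length : Int) 1)
      have hB := fwd_some card hand true none
      by_cases hE : ∃ j < hand.length, goodAt card none true hand j
      · rw [(loop_some card hand _).2 ((exists_iff card hand).2 hE), (hB.2 hE)]
      · have h1 : logicRackoLoop card hand (PySem.List.pyRange 0 (hand.length : Int) 1) = none := by
          rcases loop_cases card hand (PySem.List.pyRange 0 (hand.length : Int) 1) with h | h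
          · exact absurd ((exists_iff card hand).1 (hA.1 h)) hE
          · exact h
        have h2 : fwdLoop card hand (chainFlags hand) true none = none := by
          rcases fwd_cases card hand (chainFlags hand) true none with h | h
          · exact absurd (hB.1 h) hE
          · exact h
        rw [h1, h2]
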